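-- pv_equiv track=rewrite | github.com/zar1/curses_snake | curses_snake.py | snakeHere
-- ===== SOURCE A (Python) =====
-- def snakeHere(y, x, snakey, snakex):
--     lasthit = 0
--     while True:
--         try:
--             yind = snakey.index(y, lasthit)
--             lasthit = yind+1
--             if snakex[yind] == x:
--                 return True
--         except ValueError:
--             return False
-- ===== SOURCE B (Python) =====
-- def snakeHere(y, x, snakey, snakex):
--     return (y, x) in zip(snakey, snakex)
-- ===== Notes on version B (the rewrite author's own statement) =====
-- stated objective: idiomatic
-- what changed: Replaced A's stateful while/try-except loop around repeated snakey.index(y, lasthit) calls with a single tuple-membership test '(y, x) in zip(snakey, snakex)' over the paired coordinates (no indices, no exception handling).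
import Mathlib
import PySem

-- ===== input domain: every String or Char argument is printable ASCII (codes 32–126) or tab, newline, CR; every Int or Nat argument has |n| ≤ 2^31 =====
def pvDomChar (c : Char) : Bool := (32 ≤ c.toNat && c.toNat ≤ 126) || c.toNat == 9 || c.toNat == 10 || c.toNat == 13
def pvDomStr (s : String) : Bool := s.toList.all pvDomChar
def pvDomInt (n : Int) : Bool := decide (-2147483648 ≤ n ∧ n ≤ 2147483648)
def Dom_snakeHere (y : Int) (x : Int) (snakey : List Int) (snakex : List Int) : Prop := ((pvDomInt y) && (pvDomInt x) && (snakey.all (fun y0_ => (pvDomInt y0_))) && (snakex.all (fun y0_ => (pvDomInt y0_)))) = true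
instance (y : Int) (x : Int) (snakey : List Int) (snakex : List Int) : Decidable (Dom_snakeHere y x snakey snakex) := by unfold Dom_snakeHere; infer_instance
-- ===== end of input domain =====

-- B replaces A's while/try-except loop around repeated snakey.index(y, lasthit) calls by
-- a tuple-membership test on the zipped coordinate pairs (objective: idiomatic); Pre_ excludes
-- exactly the inputs where the Python A raises IndexError (B would return False there).

-- ===== PORT A =====
-- hand port of snakey.index(y, lasthit): first index ≥ k holding y (none = ValueError); exact.
def pvIdxFrom (xs : List Int) (v : Int) (k : Nat) : Option Nat :=
  if _h : k < xs.length then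
    if xs.getD k 0 = v then some k else pvIdxFrom xs v (k + 1)
  else none
termination_by xs.length - k

-- needed by snakeHereLoop's termination proof
theorem pvIdxFrom_bounds (xs : List Int) (v : Int) (k j : Nat)
    (h : pvIdxFrom xs v k = some j) : k ≤ j ∧ j < xs.length := by
  fun_induction pvIdxFrom xs v k with
  | case1 k hk hv => simp_all
  | case2 k hk hv ih => have := ih h; omega
  | case3 k hk => simp_all

-- the while-True loop of A, with state lasthit; IndexError (pyGet? = none) excluded by Pre_
def snakeHereLoop (y : Int) (x : Int) (snakey : List Int) (snakex : List Int)
    (lasthit : Nat) : Bool :=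
  match h : pvIdxFrom snakey y lasthit with
  | none => false            -- except ValueError: return False
  | some yind =>
    match PySem.List.pyGet? snakex (yind : Int) with
    | none => false          -- IndexError: outside Pre_snakeHere
    | some v => if v = x then true else snakeHereLoop y x snakey snakex (yind + 1)
termination_by snakey.length - lasthit
decreasing_by have := pvIdxFrom_bounds snakey y lasthit yind h; omega

def snakeHere (y : Int) (x : Int) (snakey : List Int) (snakex : List Int) : Bool :=
  snakeHereLoop y x snakey snakex 0

-- ===== PORT B =====
-- Source B: return (y, x) in zip(snakey, snakex)
def snakeHere_alt (y : Int) (x : Int) (snakey : List Int) (snakex : List Int) : Bool :=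
  (snakey.zip snakex).contains (y, x)

-- ===== PRECONDITION & SPEC =====
-- Pre_ excludes exactly the inputs on which the Python A raises IndexError: some occurrence
-- of y in snakey at an index ≥ len(snakex) that the scan reaches before a matching pair.
def Pre_snakeHere (y : Int) (x : Int) (snakey : List Int) (snakex : List Int) : Prop :=
  ∀ i < snakey.length, snakey.getD i 0 = y → snakex.length ≤ i →
    ∃ j < i, snakey.getD j 0 = y ∧ j < snakex.length ∧ snakex.getD j 0 = x
instance (y : Int) (x : Int) (snakey : List Int) (snakex : List Int) : Decidable (Pre_snakeHere y x snakey snakex) := by unfold Pre_snakeHere; infer_instance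

def pvWitness_snakeHere : Int × Int × List Int × List Int := (1, 2, [0, 1], [3, 2])

def Spec_snakeHere (y : Int) (x : Int) (snakey : List Int) (snakex : List Int) (out : Bool) : Prop := out = snakeHere_alt y x snakey snakex
instance (y : Int) (x : Int) (snakey : List Int) (snakex : List Int) (out : Bool) : Decidable (Spec_snakeHere y x snakey snakex out) := by unfold Spec_snakeHere; infer_instance

-- ===== CLAIM (what is proved, stated in full; the proofs are below) =====
def Claim_equal_snakeHere : Prop := ∀ (y : Int) (x : Int) (snakey : List Int) (snakex : List Int), Dom_snakeHere y x snakey snakex → Pre_snakeHere y x snakey snakex → Spec_snakeHere y x snakey snakex (snakeHere y x snakey snakex)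
-- ===== LEMMAS AND PROOFS =====

theorem pvIdxFrom_found (xs : List Int) (v : Int) (k : Nat)
    (hk : k < xs.length) (hv : xs.getD k 0 = v) : pvIdxFrom xs v k = some k := by
  rw [pvIdxFrom, dif_pos hk, if_pos hv]

theorem pvIdxFrom_skip (xs : List Int) (v : Int) (k : Nat)
    (hk : k < xs.length) (hv : ¬ xs.getD k 0 = v) :
    pvIdxFrom xs v k = pvIdxFrom xs v (k + 1) := by
  rw [pvIdxFrom, dif_pos hk, if_neg hv]

theorem pvIdxFrom_none (xs : List Int) (v : Int) (k : Nat)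
    (hk : ¬ k < xs.length) : pvIdxFrom xs v k = none := by
  rw [pvIdxFrom, dif_neg hk]

-- an indexed restatement of B used only by the proof (one step per index)
def pvScan (y : Int) (x : Int) (snakey : List Int) (snakex : List Int) (k : Nat) : Bool :=
  if h : k < snakey.length then
    if snakey.getD k 0 = y then
      match PySem.List.pyGet? snakex (k : Int) with
      | none => false
      | some v => if v = x then true else pvScan y x snakey snakex (k + 1)
    else pvScan y x snakey snakex (k + 1)
  else false
termination_by snakey.length - k

-- A's loop equals the indexed scan, on ALL inputs (both stop with false at a raising access)
theorem snakeHereLoop_eq_scan (y : Int) (x : Int) (snakey : List Int) (snakex : List Int)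
    (k : Nat) : snakeHereLoop y x snakey snakex k = pvScan y x snakey snakex k := by
  fun_induction pvScan y x snakey snakex k with
  | case1 k hk hv hg =>
    rw [snakeHereLoop, pvIdxFrom_found snakey y k hk hv]; simp [hg]
  | case2 k hk hv hg =>
    rw [snakeHereLoop, pvIdxFrom_found snakey y k hk hv]; simp [hg]
  | case3 k hk hv v hg hne ih =>
    rw [snakeHereLoop, pvIdxFrom_found snakey y k hk hv]; simp [hg, hne, ih]
  | case4 k hk hv ih =>
    rw [← ih]
    conv_lhs => rw [snakeHereLoop, pvIdxFrom_skip snakey y k hk hv]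
    conv_rhs => rw [snakeHereLoop]
  | case5 k hk =>
    rw [snakeHereLoop, pvIdxFrom_none snakey y k hk]

-- the indexed scan equals membership of (y,x) in the dropped zip, given Pre_ and that no
-- matching pair occurs before k
theorem pvScan_eq_contains (y : Int) (x : Int) (snakey : List Int) (snakex : List Int)
    (k : Nat)
    (hpre : Pre_snakeHere y x snakey snakex)
    (hnm : ∀ j < k, ¬(snakey.getD j 0 = y ∧ j < snakex.length ∧ snakex.getD j 0 = x)) :
    pvScan y x snakey snakex k = ((snakey.zip snakex).drop k).contains (y, x) := by
  fun_induction pvScan y x snakey snakex k with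
  | case1 k hk hv hg =>
    -- raising access: pyGet? snakex ↑k = none ⇒ snakex.length ≤ k, contradicts Pre_/hnm
    exfalso
    rw [PySem.List.pyGet?_natCast] at hg
    have hlen : snakex.length ≤ k := by simpa using List.getElem?_eq_none_iff.mp hg
    obtain ⟨j, hj, hy, hjx, hx⟩ := hpre k hk hv hlen
    exact hnm j hj ⟨hy, hjx, hx⟩
  | case2 k hk hv hg =>
    -- match found: (snakey[k], snakex[k]) = (y, x) heads the dropped zip
    rw [PySem.List.pyGet?_natCast] at hg
    have hkx : k < snakex.length := by
      by_contra h
      rw [List.getElem?_eq_none_iff.mpr (by omega)] at hg; exact (by simp at hg)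
    have hkz : k < (snakey.zip snakex).length := by rw [List.length_zip]; omega
    have hx : snakex[k] = x := by
      have := List.getElem?_eq_getElem hkx; rw [this] at hg; exact Option.some.inj hg
    have hy : snakey[k] = y := by rw [← List.getD_eq_getElem snakey 0 hk]; exact hv
    rw [List.drop_eq_getElem_cons hkz, List.contains_cons, List.getElem_zip, hx, hy]
    simp
  | case3 k hk hv v hg hne ih =>
    rw [PySem.List.pyGet?_natCast] at hg
    have hkx : k < snakex.length := by
      by_contra h
      rw [List.getElem?_eq_none_iff.mpr (by omega)] at hg; exact (by simp at hg)
    have hkz : k < (snakey.zip snakex).length := by rw [List.length_zip]; omega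
    have hxv : snakex[k] = v := by
      have := List.getElem?_eq_getElem hkx; rw [this] at hg; exact Option.some.inj hg
    have hy : snakey[k] = y := by rw [← List.getD_eq_getElem snakey 0 hk]; exact hv
    have hxne : snakex[k] ≠ x := by rw [hxv]; exact hne
    rw [ih ?_]
    · rw [List.drop_eq_getElem_cons hkz, List.contains_cons, List.getElem_zip]
      have : ¬ ((y, x) == (snakey[k], snakex[k])) = true := by
        simp [Prod.ext_iff]; intro _; exact fun h => hxne h.symm
      simp [this]
    · intro j hj
      rcases Nat.lt_succ_iff_lt_or_eq.mp hj with h | h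
      · exact hnm j h
      · subst h
        rintro ⟨_, _, hxx⟩
        exact hxne (by rw [← List.getD_eq_getElem snakex 0 hkx]; exact hxx)
  | case4 k hk hv ih =>
    have hy : snakey[k] ≠ y := fun h => hv (by rw [List.getD_eq_getElem snakey 0 hk]; exact h)
    rw [ih ?_]
    · by_cases hkx : k < snakex.length
      · have hkz : k < (snakey.zip snakex).length := by rw [List.length_zip]; omega
        rw [List.drop_eq_getElem_cons hkz, List.contains_cons, List.getElem_zip]
        have : ¬ ((y, x) == (snakey[k], snakex[k])) = true := by
          simp [Prod.ext_iff]; intro h; exact absurd h.symm hy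
        simp [this]
      · have hz : (snakey.zip snakex).length ≤ k := by rw [List.length_zip]; omega
        rw [List.drop_eq_nil_of_le hz, List.drop_eq_nil_of_le (by omega)]
    · intro j hj
      rcases Nat.lt_succ_iff_lt_or_eq.mp hj with h | h
      · exact hnm j h
      · subst h; rintro ⟨hyy, _, _⟩; exact hv hyy
  | case5 k hk =>
    have hz : (snakey.zip snakex).length ≤ k := by rw [List.length_zip]; omega
    rw [List.drop_eq_nil_of_le hz]; rfl

-- ===== VERDICT (by name: the statement is the Claim_ definition above) =====
theorem snakeHere_spec : Claim_equal_snakeHere := by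
  intro y x snakey snakex _ hpre
  unfold Spec_snakeHere snakeHere snakeHere_alt
  rw [snakeHereLoop_eq_scan,
      pvScan_eq_contains y x snakey snakex 0 hpre (by intro j hj; omega)]
  rfl
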